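-- pv_equiv track=rewrite | github.com/xander27481/informatica5 | 12a - Roosters/Kleurendriehoek.py | kleuren
-- ===== SOURCE A (Python) =====
-- def kleuren(lijst):
--     aantal_G, aantal_Y, aantal_R = 0, 0, 0
--     for rij in range(len(lijst)):
--         for kolom in range(len(lijst[rij])):
--             if lijst[rij][kolom] == 'G':
--                 aantal_G += 1
--             elif lijst[rij][kolom] == 'Y':
--                 aantal_Y += 1
--             else:
--                 aantal_R += 1
--     return aantal_G, aantal_R, aantal_Y
-- ===== SOURCE B (Python) =====
-- def kleuren(lijst):
--     flat = [c for rij in lijst for c in rij]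
--     g = flat.count('G')
--     y = flat.count('Y')
--     return g, len(flat) - g - y, y
-- ===== Notes on version B (the rewrite author's own statement) =====
-- stated objective: idiomatic
-- what changed: B flattens the grid once and uses list.count for G and Y, deriving R by subtraction (total - G - Y) instead of A's per-cell if/elif/else branch over nested index loops.
import Mathlib
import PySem

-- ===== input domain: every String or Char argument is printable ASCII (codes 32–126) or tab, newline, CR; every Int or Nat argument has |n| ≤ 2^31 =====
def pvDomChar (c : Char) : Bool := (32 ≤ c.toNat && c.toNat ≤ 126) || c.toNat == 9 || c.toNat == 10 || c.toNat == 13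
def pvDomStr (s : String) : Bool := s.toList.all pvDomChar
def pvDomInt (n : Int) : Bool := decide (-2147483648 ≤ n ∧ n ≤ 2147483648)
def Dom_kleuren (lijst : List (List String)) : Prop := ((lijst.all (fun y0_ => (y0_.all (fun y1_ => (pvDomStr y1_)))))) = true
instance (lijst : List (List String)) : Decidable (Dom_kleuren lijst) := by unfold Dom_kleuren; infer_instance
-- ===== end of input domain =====

-- B flattens the grid once, counts 'G' and 'Y', and derives R by subtraction instead of A's per-cell else-branch (idiomatic decomposition).


-- ===== PORT A =====
-- state is (aantal_G, aantal_Y, aantal_R); the body of the inner loop (the if/elif/else chain)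
def kleurenStap (st : Int × Int × Int) (c : String) : Int × Int × Int :=
  if c == "G" then (st.1 + 1, st.2.1, st.2.2)
  else if c == "Y" then (st.1, st.2.1 + 1, st.2.2)
  else (st.1, st.2.1, st.2.2 + 1)

-- the index loops 'for rij in range(len(lijst))' / 'for kolom in range(len(lijst[rij]))'
-- visit exactly the elements in order, ported as folds over the lists
def kleuren (lijst : List (List String)) : Int × Int × Int :=
  let s := lijst.foldl (fun st rij => rij.foldl kleurenStap st) ((0 : Int), (0 : Int), (0 : Int))
  (s.1, s.2.2, s.2.1)

-- ===== PORT B =====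
def kleuren_alt (lijst : List (List String)) : Int × Int × Int :=
  let flat := lijst.flatten
  let g : Int := PySem.List.count flat "G"
  let y : Int := PySem.List.count flat "Y"
  (g, (flat.length : Int) - g - y, y)

-- ===== PRECONDITION & SPEC =====
def Spec_kleuren (lijst : List (List String)) (out : Int × Int × Int) : Prop := out = kleuren_alt lijst
instance (lijst : List (List String)) (out : Int × Int × Int) : Decidable (Spec_kleuren lijst out) := by unfold Spec_kleuren; infer_instance

-- ===== CLAIM (what is proved, stated in full; the proofs are below) =====
def Claim_equal_kleuren : Prop := ∀ (lijst : List (List String)), Dom_kleuren lijst → Spec_kleuren lijst (kleuren lijst)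

-- ===== LEMMAS AND PROOFS =====

theorem kleuren_inner (rij : List String) (g y r : Int) :
    rij.foldl kleurenStap (g, y, r)
    = (g + rij.count "G", y + rij.count "Y",
       r + ((rij.length : Int) - rij.count "G" - rij.count "Y")) := by
  induction rij generalizing g y r with
  | nil => simp
  | cons c t ih =>
    rw [List.foldl_cons]
    by_cases hg : c = "G"
    · rw [show kleurenStap (g, y, r) c = (g + 1, y, r) by simp [kleurenStap, hg], ih]
      subst hg
      simp
      omega
    · by_cases hy : c = "Y"
      · rw [show kleurenStap (g, y, r) c = (g, y + 1, r) by simp [kleurenStap, hy], ih]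
        subst hy
        simp [hg]
        omega
      · rw [show kleurenStap (g, y, r) c = (g, y, r + 1) by simp [kleurenStap, hg, hy], ih]
        simp [List.count_cons, hg, hy]
        omega
theorem kleuren_outer (lijst : List (List String)) (g y r : Int) :
    lijst.foldl (fun st rij => rij.foldl kleurenStap st) (g, y, r)
    = (g + lijst.flatten.count "G", y + lijst.flatten.count "Y",
       r + ((lijst.flatten.length : Int) - lijst.flatten.count "G" - lijst.flatten.count "Y")) := by
  induction lijst generalizing g y r with
  | nil => simp
  | cons h t ih =>
    rw [List.foldl_cons, kleuren_inner, ih]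
    simp [List.count_append]
    omega

-- ===== VERDICT (by name: the statement is the Claim_ definition above) =====
theorem kleuren_spec : Claim_equal_kleuren := by
  intro lijst _
  show kleuren lijst = kleuren_alt lijst
  unfold kleuren kleuren_alt
  rw [kleuren_outer]
  simp [PySem.List.count]
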